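-- pv_equiv track=rewrite | github.com/eremeykin/ect | tests/tools.py | transformation_exists
-- ===== SOURCE A (Python) =====
-- def transformation_exists(X, Y):
--     if len(X) != len(Y):
--         return False
--     XY = dict()
--     YX = dict()
--     for i in range(0, len(X)):
--         x, y = X[i], Y[i]
--         if x not in XY:
--             XY[x] = y
--         else:
--             if XY[x] != y:
--                 return False
--         if y not in YX:
--             YX[y] = x
--         else:
--             if YX[y] != x:
--                 return False
--
--     inv = {v: k for k, v in YX.items()}
--     if inv != XY:
--         return False
--     return True
-- ===== SOURCE B (Python) =====
-- def transformation_exists(X, Y):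
--     if len(X) != len(Y):
--         return False
--     pairs = set(zip(X, Y))
--     return len(pairs) == len(set(X)) == len(set(Y))
-- ===== Notes on version B (the rewrite author's own statement) =====
-- stated objective: simpler
-- what changed: Replaces the two mirrored dicts with early-exit conflict checks plus the final dict-inversion equality test by a cardinality argument: zip(X, Y) is a consistent bijection iff the number of distinct pairs equals the number of distinct x's and the number of distinct y's.
import Mathlib
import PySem

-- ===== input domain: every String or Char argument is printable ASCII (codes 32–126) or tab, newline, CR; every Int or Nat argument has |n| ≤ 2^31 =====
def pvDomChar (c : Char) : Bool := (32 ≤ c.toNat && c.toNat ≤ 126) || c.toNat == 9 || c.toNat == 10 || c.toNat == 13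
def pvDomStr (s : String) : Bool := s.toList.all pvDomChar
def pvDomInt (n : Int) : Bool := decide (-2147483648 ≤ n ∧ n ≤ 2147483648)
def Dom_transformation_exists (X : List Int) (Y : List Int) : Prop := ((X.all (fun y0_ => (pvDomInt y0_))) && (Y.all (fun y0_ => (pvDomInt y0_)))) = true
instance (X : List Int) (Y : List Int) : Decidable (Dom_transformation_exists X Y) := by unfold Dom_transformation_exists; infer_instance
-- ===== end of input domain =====

-- B replaces A's two mirrored dicts + early returns + dict-inversion equality check by a set-cardinality test on zip(X, Y): distinct pairs == distinct x's == distinct y's; simpler, not faster.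


-- ===== PORT A =====
-- Python dict `==` (mapping equality, order-ignoring): same number of keys and every item of d1 found in d2.
def pyDictEqII (d1 d2 : PySem.Dict Int Int) : Bool :=
  d1.size == d2.size && d1.items.all (fun p => d2.get? p.1 == some p.2)

-- A's `for i in range(0, len(X))` reading X[i], Y[i]: the lengths are equal past the guard,
-- so the loop streams exactly the pairs of X.zip Y; early `return False` = the `none` result.
def loopA : List (Int × Int) → PySem.Dict Int Int → PySem.Dict Int Int →
    Option (PySem.Dict Int Int × PySem.Dict Int Int)
  | [], xy, yx => some (xy, yx)
  | (x, y) :: rest, xy, yx =>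
    match (match xy.get? x with
           | none => some (xy.insert x y)          -- if x not in XY: XY[x] = y
           | some v => if v ≠ y then none else some xy) with   -- elif XY[x] != y: return False
    | none => none
    | some xy' =>
      match (match yx.get? y with
             | none => some (yx.insert y x)        -- if y not in YX: YX[y] = x
             | some w => if w ≠ x then none else some yx) with -- elif YX[y] != x: return False
      | none => none
      | some yx' => loopA rest xy' yx'

def transformation_exists (X : List Int) (Y : List Int) : Bool :=
  if X.length ≠ Y.length then false
  else
    match loopA (X.zip Y) PySem.Dict.empty PySem.Dict.empty with
    | none => false
    | some (xy, yx) =>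
      -- inv = {v: k for k, v in YX.items()}
      let inv := yx.items.foldl (fun d p => d.insert p.2 p.1) PySem.Dict.empty
      if ¬ (pyDictEqII inv xy = true) then false else true

-- ===== PORT B =====
def transformation_exists_alt (X : List Int) (Y : List Int) : Bool :=
  if X.length ≠ Y.length then false
  else
    -- pairs = set(zip(X, Y)); len(pairs) == len(set(X)) == len(set(Y))
    let pairs : PySem.Set (Int × Int) := PySem.Set.ofList (X.zip Y)
    PySem.Set.len pairs == PySem.Set.len (PySem.Set.ofList X) &&
      PySem.Set.len (PySem.Set.ofList X) == PySem.Set.len (PySem.Set.ofList Y)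

-- ===== PRECONDITION & SPEC =====
def Spec_transformation_exists (X : List Int) (Y : List Int) (out : Bool) : Prop := out = transformation_exists_alt X Y
instance (X : List Int) (Y : List Int) (out : Bool) : Decidable (Spec_transformation_exists X Y out) := by unfold Spec_transformation_exists; infer_instance

-- ===== CLAIM (what is proved, stated in full; the proofs are below) =====
def Claim_equal_transformation_exists : Prop := ∀ (X : List Int) (Y : List Int), Dom_transformation_exists X Y → Spec_transformation_exists X Y (transformation_exists X Y)

-- ===== LEMMAS AND PROOFS =====

-- the pair list is a "consistent bijection": equal firsts iff equal seconds
def GoodL (L : List (Int × Int)) : Prop := ∀ p ∈ L, ∀ q ∈ L, (p.1 = q.1 ↔ p.2 = q.2)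
def SideD (S : List (Int × Int)) (d : PySem.Dict Int Int) : Prop :=
  d.keys.Nodup ∧ (∀ a b, d.get? a = some b → (a, b) ∈ S) ∧ (∀ p ∈ S, d.get? p.1 = some p.2)
def InvD (L : List (Int × Int)) (xy yx : PySem.Dict Int Int) : Prop :=
  SideD L xy ∧ SideD (L.map Prod.swap) yx

-- two dedup'd lists with the same underlying members have the same length
theorem len_ofList_congr {α : Type} [DecidableEq α] (l1 l2 : List α)
    (h : ∀ a, a ∈ l1 ↔ a ∈ l2) :
    (PySem.Set.ofList l1).length = (PySem.Set.ofList l2).length := by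
  refine List.Perm.length_eq ?_
  refine (List.perm_ext_iff_of_nodup (PySem.Set.nodup_ofList _) (PySem.Set.nodup_ofList _)).mpr ?_
  intro a
  rw [PySem.Set.mem_ofList, PySem.Set.mem_ofList]
  exact h a

-- |set(map f S)| = |S| for a duplicate-free S iff f is injective on S's members
theorem len_map_iff (S : List (Int × Int)) (f : Int × Int → Int) (hS : S.Nodup) :
    (PySem.Set.ofList (S.map f)).length = S.length ↔
      ∀ p ∈ S, ∀ q ∈ S, f p = f q → p = q := by
  constructor
  · intro hlen
    have hd : (PySem.Set.ofList (S.map f)).length = (S.map f).dedup.length := by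
      refine List.Perm.length_eq ?_
      refine (List.perm_ext_iff_of_nodup (PySem.Set.nodup_ofList _) (List.nodup_dedup _)).mpr ?_
      intro a; rw [PySem.Set.mem_ofList, List.mem_dedup]
    have hlm : (S.map f).dedup.length = (S.map f).length := by
      rw [← hd, hlen, List.length_map]
    have heq : (S.map f).dedup = S.map f := (List.dedup_sublist _).eq_of_length hlm
    have hnd : (S.map f).Nodup := by rw [← heq]; exact List.nodup_dedup _
    exact (List.nodup_map_iff_inj_on hS).mp hnd
  · intro hinj
    have hnd : (S.map f).Nodup := (List.nodup_map_iff_inj_on hS).mpr hinj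
    rw [PySem.Set.ofList_eq_self_of_nodup _ hnd, List.length_map]

theorem alt_iff (X Y : List Int) :
    transformation_exists_alt X Y = true ↔ X.length = Y.length ∧ GoodL (X.zip Y) := by
  by_cases h : X.length = Y.length
  · simp only [transformation_exists_alt, h, ne_eq, not_true_eq_false, if_neg, not_false_iff,
      Bool.and_eq_true, beq_iff_eq, PySem.Set.len, true_and]
    set L := X.zip Y with hL
    set S : List (Int × Int) := PySem.Set.ofList L with hS
    have hSn : S.Nodup := PySem.Set.nodup_ofList _
    have hmemS : ∀ p, p ∈ S ↔ p ∈ L := fun p => PySem.Set.mem_ofList _ _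
    have hfst : ∀ a : Int, a ∈ X ↔ a ∈ S.map Prod.fst := by
      intro a
      rw [List.mem_map]
      constructor
      · intro ha
        have : a ∈ L.map Prod.fst := by rw [List.map_fst_zip h.le]; exact ha
        rcases List.mem_map.mp this with ⟨p, hp, he⟩
        exact ⟨p, (hmemS p).mpr hp, he⟩
      · rintro ⟨p, hp, he⟩
        have : a ∈ L.map Prod.fst := List.mem_map.mpr ⟨p, (hmemS p).mp hp, he⟩
        rwa [List.map_fst_zip h.le] at this
    have hsnd : ∀ a : Int, a ∈ Y ↔ a ∈ S.map Prod.snd := by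
      intro a
      rw [List.mem_map]
      constructor
      · intro ha
        have : a ∈ L.map Prod.snd := by rw [List.map_snd_zip h.ge]; exact ha
        rcases List.mem_map.mp this with ⟨p, hp, he⟩
        exact ⟨p, (hmemS p).mpr hp, he⟩
      · rintro ⟨p, hp, he⟩
        have : a ∈ L.map Prod.snd := List.mem_map.mpr ⟨p, (hmemS p).mp hp, he⟩
        rwa [List.map_snd_zip h.ge] at this
    have eX : (PySem.Set.ofList X).length = (PySem.Set.ofList (S.map Prod.fst)).length :=
      len_ofList_congr _ _ hfst
    have eY : (PySem.Set.ofList Y).length = (PySem.Set.ofList (S.map Prod.snd)).length :=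
      len_ofList_congr _ _ hsnd
    constructor
    · rintro ⟨h1, h2⟩
      have i1 : ∀ p ∈ S, ∀ q ∈ S, p.1 = q.1 → p = q := by
        refine (len_map_iff S Prod.fst hSn).mp ?_
        rw [← eX]
        exact_mod_cast h1.symm
      have i2 : ∀ p ∈ S, ∀ q ∈ S, p.2 = q.2 → p = q := by
        refine (len_map_iff S Prod.snd hSn).mp ?_
        rw [← eY]
        omega
      intro p hp q hq
      exact ⟨fun e => by rw [i1 p ((hmemS p).mpr hp) q ((hmemS q).mpr hq) e],
             fun e => by rw [i2 p ((hmemS p).mpr hp) q ((hmemS q).mpr hq) e]⟩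
    · intro hG
      have i1 : ∀ p ∈ S, ∀ q ∈ S, p.1 = q.1 → p = q := by
        intro p hp q hq e
        have := (hG p ((hmemS p).mp hp) q ((hmemS q).mp hq)).mp e
        exact Prod.ext e this
      have i2 : ∀ p ∈ S, ∀ q ∈ S, p.2 = q.2 → p = q := by
        intro p hp q hq e
        have := (hG p ((hmemS p).mp hp) q ((hmemS q).mp hq)).mpr e
        exact Prod.ext this e
      have h1 := (len_map_iff S Prod.fst hSn).mpr i1
      have h2 := (len_map_iff S Prod.snd hSn).mpr i2
      rw [← eX] at h1
      rw [← eY] at h2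
      omega
  · simp [transformation_exists_alt, h]

theorem good_append (seen : List (Int × Int)) (x y : Int) (hG : GoodL seen)
    (hx : ∀ p ∈ seen, p.1 = x → p.2 = y) (hy : ∀ p ∈ seen, p.2 = y → p.1 = x) :
    GoodL (seen ++ [(x, y)]) := by
  intro p hp q hq
  simp only [List.mem_append, List.mem_singleton] at hp hq
  rcases hp with hp | hp <;> rcases hq with hq | hq
  · exact hG p hp q hq
  · subst hq; exact ⟨hx p hp, hy p hp⟩
  · subst hp
    exact ⟨fun h => (hx q hq h.symm).symm, fun h => (hy q hq h.symm).symm⟩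
  · subst hp; subst hq; simp

theorem side_step (S : List (Int × Int)) (d : PySem.Dict Int Int) (x y : Int)
    (hS : SideD S d) (hok : d.get? x = none ∨ d.get? x = some y) :
    ∃ d', (match d.get? x with
           | none => some (d.insert x y)
           | some v => if v ≠ y then none else some d) = some d' ∧
      SideD (S ++ [(x, y)]) d' ∧ (∀ p ∈ S, p.1 = x → p.2 = y) := by
  obtain ⟨hnd, h1, h2⟩ := hS
  rcases hok with hgx | hgx
  · refine ⟨d.insert x y, by rw [hgx], ⟨PySem.Dict.nodup_keys_insert _ _ _ hnd, ?_, ?_⟩, ?_⟩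
    · intro a b hab
      rw [PySem.Dict.get?_insert] at hab
      by_cases hax : a = x
      · simp [hax] at hab; simp [hax, hab]
      · rw [if_neg hax] at hab
        exact List.mem_append_left _ (h1 a b hab)
    · intro p hp
      rcases List.mem_append.mp hp with hp | hp
      · have hpx : p.1 ≠ x := by
          intro c
          have := h2 p hp; rw [c, hgx] at this; simp at this
        rw [PySem.Dict.get?_insert, if_neg hpx]; exact h2 p hp
      · simp only [List.mem_singleton] at hp
        subst hp; exact PySem.Dict.get?_insert_self _ _ _
    · intro p hp hpx
      have := h2 p hp; rw [hpx, hgx] at this; simp at this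
  · refine ⟨d, by rw [hgx]; simp, ⟨hnd, ?_, ?_⟩, ?_⟩
    · intro a b hab; exact List.mem_append_left _ (h1 a b hab)
    · intro p hp
      rcases List.mem_append.mp hp with hp | hp
      · exact h2 p hp
      · simp only [List.mem_singleton] at hp; subst hp; exact hgx
    · intro p hp hpx
      have := h2 p hp; rw [hpx, hgx] at this; injection this with h; exact h.symm

theorem swap_mem (L : List (Int × Int)) (a b : Int) : (a, b) ∈ L.map Prod.swap ↔ (b, a) ∈ L := by
  constructor
  · intro h
    rcases List.mem_map.mp h with ⟨p, hp, he⟩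
    obtain ⟨u, v⟩ := p
    simp [Prod.swap] at he
    rwa [← he.1, ← he.2]
  · intro h; exact List.mem_map.mpr ⟨(b, a), h, rfl⟩

theorem loopA_spec (rest : List (Int × Int)) :
    ∀ (seen : List (Int × Int)) (xy yx : PySem.Dict Int Int),
      InvD seen xy yx → GoodL seen →
      (loopA rest xy yx = none ∧ ¬ GoodL (seen ++ rest)) ∨
      (∃ xy' yx', loopA rest xy yx = some (xy', yx') ∧ InvD (seen ++ rest) xy' yx' ∧ GoodL (seen ++ rest)) := by
  induction rest with
  | nil =>
    intro seen xy yx hI hG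
    right; exact ⟨xy, yx, rfl, by simpa using hI, by simpa using hG⟩
  | cons hd rest ih =>
    obtain ⟨x, y⟩ := hd
    intro seen xy yx hI hG
    obtain ⟨hX, hY⟩ := hI
    by_cases hfx : ∃ v, xy.get? x = some v ∧ v ≠ y
    · -- XY conflict: early False
      obtain ⟨v, hgx, hv⟩ := hfx
      left
      refine ⟨by simp [loopA, hgx, hv], ?_⟩
      intro hGall
      have hmem : (x, v) ∈ seen ++ (x, y) :: rest := List.mem_append_left _ (hX.2.1 x v hgx)
      have hmem2 : (x, y) ∈ seen ++ (x, y) :: rest := by simp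
      exact hv ((hGall (x, v) hmem (x, y) hmem2).mp rfl)
    · have hokx : xy.get? x = none ∨ xy.get? x = some y := by
        rcases hgx : xy.get? x with _ | v
        · exact Or.inl rfl
        · by_cases hv : v = y
          · right; rw [hv]
          · exact absurd ⟨v, hgx, hv⟩ hfx
      obtain ⟨xy', hstepx, hSX', hx'⟩ := side_step seen xy x y hX hokx
      by_cases hfy : ∃ w, yx.get? y = some w ∧ w ≠ x
      · -- YX conflict: early False
        obtain ⟨w, hgy, hw⟩ := hfy
        left
        refine ⟨by simp only [loopA]; rw [hstepx]; simp [hgy, hw], ?_⟩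
        intro hGall
        have hmem : (w, y) ∈ seen ++ (x, y) :: rest :=
          List.mem_append_left _ ((swap_mem seen y w).mp (hY.2.1 y w hgy))
        have hmem2 : (x, y) ∈ seen ++ (x, y) :: rest := by simp
        exact hw ((hGall (w, y) hmem (x, y) hmem2).mpr rfl)
      · have hoky : yx.get? y = none ∨ yx.get? y = some x := by
          rcases hgy : yx.get? y with _ | w
          · exact Or.inl rfl
          · by_cases hw : w = x
            · right; rw [hw]
            · exact absurd ⟨w, hgy, hw⟩ hfy
        obtain ⟨yx', hstepy, hSY', hy'⟩ := side_step (seen.map Prod.swap) yx y x hY hoky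
        have hG' : GoodL (seen ++ [(x, y)]) := by
          refine good_append seen x y hG hx' ?_
          intro p hp hp2
          exact hy' (p.2, p.1) ((swap_mem seen p.2 p.1).mpr (by simpa using hp)) hp2
        have hI' : InvD (seen ++ [(x, y)]) xy' yx' := by
          refine ⟨hSX', ?_⟩
          rw [List.map_append]
          simpa using hSY'
        have := ih (seen ++ [(x, y)]) xy' yx' hI' hG'
        have hred : loopA ((x, y) :: rest) xy yx = loopA rest xy' yx' := by
          simp only [loopA]; rw [hstepx, hstepy]
        rw [hred, List.append_assoc] at *
        simpa using this

theorem dict_check (L : List (Int × Int)) (xy yx : PySem.Dict Int Int)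
    (hI : InvD L xy yx) :
    pyDictEqII (yx.items.foldl (fun d p => d.insert p.2 p.1) PySem.Dict.empty) xy = true := by
  obtain ⟨⟨hnx, hx1, hx2⟩, ⟨hny, hy1, hy2⟩⟩ := hI
  -- symmetry of the two dicts
  have sym : ∀ a b : Int, xy.get? a = some b ↔ yx.get? b = some a := by
    intro a b
    constructor
    · intro h
      exact hy2 (b, a) ((swap_mem L b a).mpr (hx1 a b h))
    · intro h
      exact hx2 (a, b) ((swap_mem L b a).mp (hy1 b a h))
  have memyx : ∀ a b : Int, (a, b) ∈ yx.items ↔ yx.get? a = some b := by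
    intro a b; exact (PySem.Dict.get?_eq_some_iff_mem_items _ _ _ hny).symm
  have memxy : ∀ a b : Int, (a, b) ∈ xy.items ↔ xy.get? a = some b := by
    intro a b; exact (PySem.Dict.get?_eq_some_iff_mem_items _ _ _ hnx).symm
  have pairfst : yx.items.Pairwise (fun p q => p.1 ≠ q.1) := by
    exact List.pairwise_map.mp (by simpa only [PySem.Dict.keys] using hny)
  have pairsnd : yx.items.Pairwise (fun p q => p.2 ≠ q.2) := by
    refine List.Pairwise.imp_of_mem ?_ pairfst
    intro p q hp hq hne he
    apply hne
    have h1 : yx.get? p.1 = some p.2 := (memyx p.1 p.2).mp (by simpa using hp)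
    have h2 : yx.get? q.1 = some q.2 := (memyx q.1 q.2).mp (by simpa using hq)
    have h1' : xy.get? p.2 = some p.1 := (sym p.2 p.1).mpr (by simpa using h1)
    have h2' : xy.get? q.2 = some q.1 := (sym q.2 q.1).mpr (by simpa using h2)
    rw [he] at h1'
    rw [h2'] at h1'
    injection h1' with h; exact h.symm
  have hvnodup : (yx.items.map Prod.snd).Nodup := List.pairwise_map.mpr pairsnd
  have hfresh : ∀ p ∈ yx.items, (PySem.Dict.empty : PySem.Dict Int Int).contains p.2 = false := by
    intro p _; exact PySem.Dict.contains_empty _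
  have hinv_items : (yx.items.foldl (fun d p => d.insert p.2 p.1) PySem.Dict.empty).items
      = yx.items.map Prod.swap := by
    rw [PySem.Dict.items_foldl_insert_fresh _ _ _ _ hfresh hvnodup]
    have : (fun p : Int × Int => (p.2, p.1)) = Prod.swap := by
      funext p; rfl
    rw [this]
    rfl
  set inv := yx.items.foldl (fun d p => d.insert p.2 p.1) PySem.Dict.empty with hinv
  have memeq : ∀ p : Int × Int, p ∈ inv.items ↔ p ∈ xy.items := by
    intro p
    obtain ⟨a, b⟩ := p
    rw [hinv_items, swap_mem, memyx, memxy]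
    exact (sym a b).symm
  have hinvkeys : inv.keys = yx.items.map Prod.snd := by
    have : inv.keys = inv.items.map Prod.fst := rfl
    rw [this, hinv_items, List.map_map]
    rfl
  have hinvnodup : inv.items.Nodup := by
    refine List.Nodup.of_map Prod.fst ?_
    rw [show inv.items.map Prod.fst = inv.keys from rfl, hinvkeys]
    exact hvnodup
  have hxynodup : xy.items.Nodup := List.Nodup.of_map _ hnx
  have hperm : inv.items.Perm xy.items := (List.perm_ext_iff_of_nodup hinvnodup hxynodup).mpr memeq
  have hlen : inv.items.length = xy.items.length := hperm.length_eq
  simp only [pyDictEqII, Bool.and_eq_true, List.all_eq_true, beq_iff_eq]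
  constructor
  · show inv.items.length = xy.items.length
    exact hlen
  · intro p hp
    exact (memxy p.1 p.2).mp (by simpa using (memeq p).mp hp)

theorem transformation_exists_spec : Claim_equal_transformation_exists := by
  intro X Y _
  unfold Spec_transformation_exists
  by_cases hlen : X.length = Y.length
  · have hI0 : InvD [] PySem.Dict.empty PySem.Dict.empty := by
      refine ⟨⟨?_, ?_, ?_⟩, ⟨?_, ?_, ?_⟩⟩ <;>
        first
        | exact PySem.Dict.nodup_keys_empty
        | (intro a b h; rw [PySem.Dict.get?_empty] at h; simp at h)
        | (intro p hp; simp at hp)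
    have hG0 : GoodL [] := by intro p hp; simp at hp
    rcases loopA_spec (X.zip Y) [] _ _ hI0 hG0 with ⟨hnone, hnG⟩ | ⟨xy, yx, hsome, hI, hGd⟩
    · have hB : transformation_exists_alt X Y = false := by
        cases hb : transformation_exists_alt X Y
        · rfl
        · exact absurd (by simpa using ((alt_iff X Y).mp hb).2) (by simpa using hnG)
      rw [hB]
      simp [transformation_exists, hlen, hnone]
    · have hB : transformation_exists_alt X Y = true :=
        (alt_iff X Y).mpr ⟨hlen, by simpa using hGd⟩
      rw [hB]
      have hck := dict_check (X.zip Y) xy yx (by simpa using hI)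
      simp [transformation_exists, hlen, hsome, hck]
  · simp [transformation_exists, transformation_exists_alt, hlen]
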